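-- pv_equiv track=rewrite | github.com/subrasinght010/ReactAct | backend/analyzer/management/commands/send_tracking_mails.py | _is_hard_mail_failure
-- ===== SOURCE A (Python) =====
-- def _is_hard_mail_failure(message):
--     text = str(message or "").strip().lower()
--     markers = [
--         "user unknown",
--         "address not found",
--         "recipient address rejected",
--         "no such user",
--         "invalid recipient",
--         "mailbox unavailable",
--         "5.1.1",
--         "550",
--         "bounced",
--         "undeliverable",
--     ]
--     return any(marker in text for marker in markers)
-- ===== SOURCE B (Python) =====
-- MARKERS = [
--     "user unknown",
--     "address not found",
--     "recipient address rejected",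
--     "no such user",
--     "invalid recipient",
--     "mailbox unavailable",
--     "5.1.1",
--     "550",
--     "bounced",
--     "undeliverable",
-- ]
--
--
-- def _is_hard_mail_failure(message):
--     text = str(message or "").strip().lower()
--     # single left-to-right pass over positions: at each position, test whether
--     # any marker starts there, instead of ten independent substring scans
--     for i in range(len(text) + 1):
--         for m in MARKERS:
--             if text.startswith(m, i):
--                 return True
--     return False
-- ===== Notes on version B (the rewrite author's own statement) =====
-- stated objective: alternative
-- what changed: Replaces the ten independent per-marker substring scans of the text with a single left-to-right pass over text positions, testing at each offset whether any marker starts there via startswith with a start argument.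
import Mathlib
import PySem

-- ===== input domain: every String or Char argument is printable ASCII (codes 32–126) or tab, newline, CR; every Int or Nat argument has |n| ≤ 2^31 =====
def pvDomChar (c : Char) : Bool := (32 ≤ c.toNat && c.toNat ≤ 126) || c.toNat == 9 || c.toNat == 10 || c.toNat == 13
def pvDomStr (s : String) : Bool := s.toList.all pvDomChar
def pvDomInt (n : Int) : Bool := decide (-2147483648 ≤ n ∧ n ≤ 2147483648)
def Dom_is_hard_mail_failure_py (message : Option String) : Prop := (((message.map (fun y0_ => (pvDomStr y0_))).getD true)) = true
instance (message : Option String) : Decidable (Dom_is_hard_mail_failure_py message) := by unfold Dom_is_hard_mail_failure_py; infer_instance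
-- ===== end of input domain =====

-- B is an alternative implementation of the same marker check: one left-to-right pass
-- over text positions (startswith at each offset) instead of ten independent substring scans.

-- ===== PORT A =====
def is_hard_mail_failure_py (message : Option String) : Bool :=
  let text := PySem.Str.lower (PySem.Str.strip (message.getD ""))
  let markers : List String :=
    ["user unknown", "address not found", "recipient address rejected",
     "no such user", "invalid recipient", "mailbox unavailable",
     "5.1.1", "550", "bounced", "undeliverable"]
  markers.any (fun marker => PySem.Str.isIn marker text)

-- ===== PORT B =====
def markersAlt : List String :=
  ["user unknown", "address not found", "recipient address rejected",
   "no such user", "invalid recipient", "mailbox unavailable",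
   "5.1.1", "550", "bounced", "undeliverable"]

def is_hard_mail_failure_py_alt (message : Option String) : Bool :=
  let t := (PySem.Str.lower (PySem.Str.strip (message.getD ""))).toList
  -- for i in range(len(text)+1): for m in MARKERS: if text.startswith(m, i): return True
  (List.range (t.length + 1)).any (fun i =>
    markersAlt.any (fun m => PySem.Chars.startswith (t.drop i) m.toList))

-- ===== PRECONDITION & SPEC =====
def Spec_is_hard_mail_failure_py (message : Option String) (out : Bool) : Prop := out = is_hard_mail_failure_py_alt message
instance (message : Option String) (out : Bool) : Decidable (Spec_is_hard_mail_failure_py message out) := by unfold Spec_is_hard_mail_failure_py; infer_instance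

-- ===== CLAIM (what is proved, stated in full; the proofs are below) =====
def Claim_equal_is_hard_mail_failure_py : Prop := ∀ (message : Option String), Dom_is_hard_mail_failure_py message → Spec_is_hard_mail_failure_py message (is_hard_mail_failure_py message)

-- ===== LEMMAS AND PROOFS =====

-- 'sub in t' equals 'some position i ≤ len t where sub is a prefix of t.drop i'
lemma isIn_eq_any_range_startswith (sub t : List Char) :
    PySem.Chars.isIn sub t
      = (List.range (t.length + 1)).any (fun i => PySem.Chars.startswith (t.drop i) sub) := by
  rw [Bool.eq_iff_iff]
  simp only [List.any_eq_true, List.mem_range, PySem.Chars.startswith_iff]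
  constructor
  · intro h
    obtain ⟨j, hj⟩ := (PySem.Chars.exists_prefix_drop_iff_isIn sub t).mpr h
    by_cases hle : j ≤ t.length
    · exact ⟨j, by omega, hj⟩
    · refine ⟨t.length, by omega, ?_⟩
      rw [List.drop_length]
      rwa [List.drop_eq_nil_of_le (by omega)] at hj
  · rintro ⟨i, _, hi⟩
    exact (PySem.Chars.exists_prefix_drop_iff_isIn sub t).mp ⟨i, hi⟩

-- the marker-driven scan equals the position-driven scan (swap the two quantifiers)
lemma markers_any_eq_positions_any (ms : List String) (t : List Char) :
    ms.any (fun m => PySem.Chars.isIn m.toList t)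
      = (List.range (t.length + 1)).any (fun i =>
          ms.any (fun m => PySem.Chars.startswith (t.drop i) m.toList)) := by
  simp only [isIn_eq_any_range_startswith]
  rw [Bool.eq_iff_iff]
  simp only [List.any_eq_true]
  exact ⟨fun ⟨m, hm, i, hi, h⟩ => ⟨i, hi, m, hm, h⟩, fun ⟨i, hi, m, hm, h⟩ => ⟨m, hm, i, hi, h⟩⟩

-- ===== VERDICT (by name: the statement is the Claim_ definition above) =====
theorem is_hard_mail_failure_py_spec : Claim_equal_is_hard_mail_failure_py := by
  intro message _
  unfold Spec_is_hard_mail_failure_py is_hard_mail_failure_py is_hard_mail_failure_py_alt markersAlt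
  simp only [PySem.Str.isIn]
  exact markers_any_eq_positions_any _ _
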